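-- pv_equiv track=rewrite | github.com/stelic/limitload | src/core/table.py | _shift_index
-- ===== SOURCE A (Python) =====
-- def _shift_index (num, k, dk, periodic=False):
--
--     k += dk
--     if k < 0:
--         if periodic:
--             while k < 0:
--                 k += num
--         else: # not valid
--             k = -1
--     elif k >= num:
--         if periodic:
--             while k >= num:
--                 k -= num
--         else: # not valid
--             k = -1
--     return k
-- ===== SOURCE B (Python) =====
-- def _shift_index(num, k, dk, periodic=False):
--     k += dk
--     if 0 <= k < num:
--         return k
--     if not periodic:
--         return -1
--     return k % num
-- ===== Notes on version B (the rewrite author's own statement) =====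
-- stated objective: simpler
-- what changed: Replaces both wraparound while-loops with a single Python modulo after one in-range check, removing all iteration.
import Mathlib
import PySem

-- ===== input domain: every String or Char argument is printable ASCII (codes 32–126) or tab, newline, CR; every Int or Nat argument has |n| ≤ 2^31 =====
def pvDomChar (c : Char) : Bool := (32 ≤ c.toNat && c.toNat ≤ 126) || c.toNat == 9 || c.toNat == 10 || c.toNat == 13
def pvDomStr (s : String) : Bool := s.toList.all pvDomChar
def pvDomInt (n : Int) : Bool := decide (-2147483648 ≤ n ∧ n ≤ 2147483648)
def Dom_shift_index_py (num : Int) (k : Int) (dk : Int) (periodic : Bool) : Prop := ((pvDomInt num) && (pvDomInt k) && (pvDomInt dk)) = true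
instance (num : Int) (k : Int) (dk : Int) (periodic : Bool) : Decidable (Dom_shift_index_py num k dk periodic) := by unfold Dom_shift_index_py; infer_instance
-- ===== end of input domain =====

-- B replaces A's two wraparound while-loops with one in-range check and a single modulo (simpler, no iteration).

-- ===== PORT A =====
-- 'while k < 0: k += num'; the '0 < num' guard only makes the loop total (A diverges when num ≤ 0, excluded by Pre_)
def pvWhileAdd (num k : Int) : Int :=
  if h : 0 < num ∧ k < 0 then pvWhileAdd num (k + num) else k
termination_by (-k).toNat
decreasing_by omega

-- 'while k >= num: k -= num'; same totality guard
def pvWhileSub (num k : Int) : Int :=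
  if h : 0 < num ∧ num ≤ k then pvWhileSub num (k - num) else k
termination_by k.toNat
decreasing_by omega

def shift_index_py (num : Int) (k : Int) (dk : Int) (periodic : Bool) : Int :=
  let k := k + dk
  if k < 0 then
    if periodic then pvWhileAdd num k else -1
  else if k ≥ num then
    if periodic then pvWhileSub num k else -1
  else k

-- ===== PORT B =====
def shift_index_py_alt (num : Int) (k : Int) (dk : Int) (periodic : Bool) : Int :=
  let k := k + dk
  if 0 ≤ k ∧ k < num then k
  else if !periodic then -1
  else PySem.Int.mod k num

-- ===== PRECONDITION & SPEC =====
-- Pre_ excludes only periodic calls with num ≤ 0: there A's while-loop never terminates (and B's '%' would raise for num = 0).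
def Pre_shift_index_py (num : Int) (k : Int) (dk : Int) (periodic : Bool) : Prop :=
  periodic = true → 0 < num
instance (num : Int) (k : Int) (dk : Int) (periodic : Bool) : Decidable (Pre_shift_index_py num k dk periodic) := by unfold Pre_shift_index_py; infer_instance
def pvWitness_shift_index_py : Int × Int × Int × Bool := (5, 2, 7, true)

def Spec_shift_index_py (num : Int) (k : Int) (dk : Int) (periodic : Bool) (out : Int) : Prop := out = shift_index_py_alt num k dk periodic
instance (num : Int) (k : Int) (dk : Int) (periodic : Bool) (out : Int) : Decidable (Spec_shift_index_py num k dk periodic out) := by unfold Spec_shift_index_py; infer_instance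

-- ===== CLAIM =====
def Claim_equal_shift_index_py : Prop := ∀ (num : Int) (k : Int) (dk : Int) (periodic : Bool), Dom_shift_index_py num k dk periodic → Pre_shift_index_py num k dk periodic → Spec_shift_index_py num k dk periodic (shift_index_py num k dk periodic)

-- ===== LEMMAS AND PROOFS =====

theorem pvWhileAdd_eq_emod (num : Int) (hnum : 0 < num) :
    ∀ k : Int, k < 0 → pvWhileAdd num k = k % num := by
  intro k
  induction k using pvWhileAdd.induct num with
  | case1 k h ih =>
    intro _
    rw [pvWhileAdd, dif_pos h]
    by_cases hk : k + num < 0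
    · rw [ih hk]
      have h2 := Int.add_mul_emod_self_left k num 1
      rw [mul_one] at h2
      exact h2
    · rw [pvWhileAdd, dif_neg (by omega)]
      have h1 : (k + num) % num = k + num := Int.emod_eq_of_lt (by omega) (by omega)
      have h2 := Int.add_mul_emod_self_left k num 1
      simp only [mul_one] at h2
      omega
  | case2 k h => intro hk; omega

theorem pvWhileSub_eq_emod (num : Int) (hnum : 0 < num) :
    ∀ k : Int, num ≤ k → pvWhileSub num k = k % num := by
  intro k
  induction k using pvWhileSub.induct num with
  | case1 k h ih =>
    intro _
    rw [pvWhileSub, dif_pos h]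
    by_cases hk : num ≤ k - num
    · rw [ih hk, Int.sub_emod_right]
    · rw [pvWhileSub, dif_neg (by omega)]
      have h1 : (k - num) % num = k - num := Int.emod_eq_of_lt (by omega) (by omega)
      have h2 : (k - num) % num = k % num := Int.sub_emod_right k num
      omega
  | case2 k h => intro hk; omega

-- ===== VERDICT =====
theorem shift_index_py_spec : Claim_equal_shift_index_py := by
  unfold Claim_equal_shift_index_py
  intro num k dk periodic _ hpre
  unfold Spec_shift_index_py shift_index_py shift_index_py_alt
  cases periodic with
  | false =>
    simp only [Bool.not_false, Bool.false_eq_true, if_false, if_true]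
    split_ifs <;> omega
  | true =>
    have hnum : 0 < num := hpre rfl
    simp only [Bool.not_true, Bool.false_eq_true, if_false, if_true]
    set m := k + dk with hm
    by_cases hlt : m < 0
    · rw [if_pos hlt, if_neg (by omega), pvWhileAdd_eq_emod num hnum m hlt,
        PySem.Int.mod_eq_emod_of_pos hnum]
    · rw [if_neg hlt]
      by_cases hge : m ≥ num
      · rw [if_pos hge, if_neg (by omega), pvWhileSub_eq_emod num hnum m hge,
          PySem.Int.mod_eq_emod_of_pos hnum]
      · rw [if_neg hge, if_pos (by omega)]
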